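-- pv_equiv track=rewrite | github.com/jvano74/advent_of_code | 2019/2019_16_test.py | apply_fft
-- ===== SOURCE A (Python) =====
-- def get_kernel(k_len, pos):
--     kernel = []
--     cnt = 1
--     while True:
--         for e in [0, 1, 0, -1]:
--             while cnt < pos:
--                 kernel.append(e)
--                 cnt += 1
--                 if len(kernel) == k_len:
--                     return kernel
--             cnt = 0
--
-- def apply_fft(input_msg):
--     out_msg = []
--     k_len = len(input_msg)
--     pos = 0
--     while pos < k_len:
--         pos += 1
--         d_out = 0
--         kernel = get_kernel(k_len, pos)
--         for k, d_in in zip(kernel, input_msg):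
--             d_out += k * d_in
--         if d_out < 0:
--             d_out = -d_out
--         d_out %= 10
--         out_msg.append(d_out)
--     return out_msg
-- ===== SOURCE B (Python) =====
-- def apply_fft(input_msg):
--     n = len(input_msg)
--     prefix = [0]
--     s = 0
--     for d in input_msg:
--         s += d
--         prefix.append(s)
--     out = []
--     for pos in range(1, n + 1):
--         total = 0
--         start = pos - 1
--         sign = 1
--         while start < n:
--             end = min(start + pos, n)
--             total += sign * (prefix[end] - prefix[start])
--             sign = -sign
--             start += 2 * pos
--         out.append(abs(total) % 10)
--     return out
-- ===== Notes on version B (the rewrite author's own statement) =====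
-- stated objective: faster
-- what changed: B replaces A's per-position materialized kernel and O(n) dot product with a prefix-sum array built once and evaluated in contiguous +1/-1 blocks, so position pos costs O(n/pos) instead of O(n), O(n log n) overall.
import Mathlib
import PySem

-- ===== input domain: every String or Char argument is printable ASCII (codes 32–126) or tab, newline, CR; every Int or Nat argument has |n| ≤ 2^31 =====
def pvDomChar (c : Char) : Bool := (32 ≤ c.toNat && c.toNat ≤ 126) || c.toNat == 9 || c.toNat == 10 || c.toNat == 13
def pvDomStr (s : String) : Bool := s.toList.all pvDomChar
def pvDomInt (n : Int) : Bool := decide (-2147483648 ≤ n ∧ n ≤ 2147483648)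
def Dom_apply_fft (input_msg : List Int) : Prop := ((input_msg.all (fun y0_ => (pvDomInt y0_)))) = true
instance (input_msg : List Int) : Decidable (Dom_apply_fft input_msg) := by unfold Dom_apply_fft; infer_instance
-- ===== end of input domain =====

-- B replaces A's per-position kernel materialization + dot product (O(n^2)) by a prefix-sum
-- array evaluated over the contiguous +1/-1 blocks of the kernel, O(n/pos) per digit (faster).

-- ===== PORT A =====
-- inner 'while cnt < pos' of get_kernel; Sum.inr is the 'return kernel' inside it
def gkInner (kLen pos : Nat) (e : Int) (kernel : List Int) (cnt : Nat) :
    (List Int × Nat) ⊕ List Int :=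
  if cnt < pos then
    let k' := kernel ++ [e]
    if k'.length = kLen then Sum.inr k'
    else gkInner kLen pos e k' (cnt + 1)
  else Sum.inl (kernel, cnt)
termination_by pos - cnt

-- 'for e in [0, 1, 0, -1]' body of get_kernel (cnt is reset to 0 after each inner while)
def gkCycle (kLen pos : Nat) (es : List Int) (kernel : List Int) (cnt : Nat) :
    (List Int × Nat) ⊕ List Int :=
  match es with
  | [] => Sum.inl (kernel, cnt)
  | e :: rest =>
    match gkInner kLen pos e kernel cnt with
    | Sum.inr k => Sum.inr k
    | Sum.inl (k, _) => gkCycle kLen pos rest k 0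

-- 'while True' of get_kernel; the fuel only makes the loop total (kLen cycles always
-- suffice: gkOuter_eq below never runs out when get_kernel is reached with 1 ≤ pos, 1 ≤ kLen)
def gkOuter (kLen pos : Nat) (fuel : Nat) (kernel : List Int) (cnt : Nat) : List Int :=
  match fuel with
  | 0 => kernel
  | f + 1 =>
    match gkCycle kLen pos [0, 1, 0, -1] kernel cnt with
    | Sum.inr k => k
    | Sum.inl (k, c) => gkOuter kLen pos f k c

def get_kernel (kLen pos : Nat) : List Int := gkOuter kLen pos kLen [] 1

-- 'while pos < k_len' of apply_fft
def fftLoop (input_msg : List Int) (kLen pos : Nat) (out : List Int) : List Int :=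
  if pos < kLen then
    let pos' := pos + 1
    let kernel := get_kernel kLen pos'
    let d0 := (kernel.zip input_msg).foldl (fun acc kd => acc + kd.1 * kd.2) 0
    let d1 := if d0 < 0 then -d0 else d0
    let d2 := PySem.Int.mod d1 10
    fftLoop input_msg kLen pos' (out ++ [d2])
  else out
termination_by kLen - pos

def apply_fft (input_msg : List Int) : List Int :=
  fftLoop input_msg input_msg.length 0 []

-- ===== PORT B =====
-- 'while start < n' block loop of Source B; the '0 < pos' guard only makes the recursion total
-- (every call site has 1 ≤ pos); indices are the exact Nat values of Source B's nonnegative ints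
def blockLoop (pre : List Int) (n pos start : Nat) (sign total : Int) : Int :=
  if _h : start < n ∧ 0 < pos then
    let e := min (start + pos) n
    blockLoop pre n pos (start + 2 * pos) (-sign)
      (total + sign * (PySem.List.pyGetD pre (e : Int) 0 - PySem.List.pyGetD pre (start : Int) 0))
  else total
termination_by n - start

def apply_fft_alt (input_msg : List Int) : List Int :=
  let n := input_msg.length
  let pre := (input_msg.foldl (fun st d => (st.1 ++ [st.2 + d], st.2 + d)) ([0], 0)).1
  (PySem.List.pyRange 1 ((n : Int) + 1) 1).foldl
    (fun out pos =>
      let p := pos.toNat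
      let total := blockLoop pre n p (p - 1) 1 0
      out ++ [PySem.Int.mod (|total|) 10]) []

-- ===== PRECONDITION & SPEC =====
def Spec_apply_fft (input_msg : List Int) (out : List Int) : Prop := out = apply_fft_alt input_msg
instance (input_msg : List Int) (out : List Int) : Decidable (Spec_apply_fft input_msg out) := by unfold Spec_apply_fft; infer_instance

-- ===== CLAIM (what is proved, stated in full; the proofs are below) =====
def Claim_equal_apply_fft : Prop := ∀ (input_msg : List Int), Dom_apply_fft input_msg → Spec_apply_fft input_msg (apply_fft input_msg)

-- ===== LEMMAS AND PROOFS =====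

-- the base pattern value at block index j (j = ((i+1)/pos) % 4)
def pat4 : Nat → Int
  | 1 => 1
  | 3 => -1
  | _ => 0

-- the kernel A builds, in closed form
def specList (pos n : Nat) : List Int :=
  (List.range n).map (fun i => pat4 (((i + 1) / pos) % 4))

-- what one pass of the 'for e in [0,1,0,-1]' loop appends when entered with counter cnt
def cycApp (pos cnt : Nat) : List Int :=
  List.replicate (pos - cnt) 0 ++ (List.replicate pos 1 ++
    (List.replicate pos 0 ++ List.replicate pos (-1)))

-- the per-digit accumulation A's inner zip-loop computes
def canonSum (pos : Nat) (xs : List Int) (i : Nat) (c : Int) : Int :=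
  match xs with
  | [] => c
  | x :: rest => canonSum pos rest (i + 1) (c + pat4 (((i + 1) / pos) % 4) * x)

def digitN (input : List Int) (pos : Nat) : Int :=
  PySem.Int.mod (|canonSum pos input 0 0|) 10

theorem gkInner_eq (kLen pos : Nat) (e : Int) (kernel : List Int) (cnt : Nat) :
    gkInner kLen pos e kernel cnt =
      if kernel.length < kLen ∧ kLen ≤ kernel.length + (pos - cnt)
      then Sum.inr (kernel ++ List.replicate (kLen - kernel.length) e)
      else Sum.inl (kernel ++ List.replicate (pos - cnt) e, max cnt pos) := by
  fun_induction gkInner with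
  | case1 k c h3 hk h5 =>
    have hkeq : hk = k ++ [e] := rfl
    rw [hkeq] at h5 ⊢
    have hl : (k ++ [e]).length = k.length + 1 := by simp
    rw [hl] at h5
    rw [if_pos (by omega : k.length < kLen ∧ kLen ≤ k.length + (pos - c))]
    have h6 : kLen - k.length = 1 := by omega
    simp [h6]
  | case2 k c h3 hk h5 ih =>
    have hl : (k ++ [e]).length = k.length + 1 := by simp
    rw [hl] at h5
    have hkeq : hk = k ++ [e] := rfl
    rw [hkeq] at ih ⊢
    rw [ih]
    simp only [hl]
    by_cases hcond : k.length < kLen ∧ kLen ≤ k.length + (pos - c)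
    · rw [if_pos hcond, if_pos (by omega)]
      have h7 : kLen - k.length = (kLen - (k.length + 1)) + 1 := by omega
      rw [h7, List.append_assoc]
      simp [List.replicate_succ]
    · rw [if_neg hcond, if_neg (by omega)]
      have h7 : pos - c = (pos - (c + 1)) + 1 := by omega
      have h8 : max (c + 1) pos = max c pos := by omega
      rw [h7, h8, List.append_assoc]
      simp [List.replicate_succ]
  | case3 k c h3 =>
    rw [if_neg (by omega)]
    simp [show pos - c = 0 by omega, show max c pos = c by omega]

theorem gkCycle_eq (kLen pos : Nat) (kernel : List Int) (cnt : Nat)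
    (hp : 1 ≤ pos) (hc : cnt ≤ 1) :
    gkCycle kLen pos [0, 1, 0, -1] kernel cnt =
      if kernel.length < kLen ∧ kLen ≤ kernel.length + (4 * pos - cnt)
      then Sum.inr (kernel ++ (cycApp pos cnt).take (kLen - kernel.length))
      else Sum.inl (kernel ++ cycApp pos cnt, 0) := by
  have hcp : cnt ≤ pos := by omega
  simp only [gkCycle, gkInner_eq]
  by_cases h1 : kernel.length < kLen ∧ kLen ≤ kernel.length + (pos - cnt)
  · rw [if_pos h1, if_pos (by omega)]
    dsimp only
    congr 1
    rw [cycApp, List.take_append_of_le_length (by simp; omega), List.take_replicate,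
      Nat.min_eq_left (by omega)]
  · rw [if_neg h1]
    dsimp only
    simp only [List.length_append, List.length_replicate, Nat.sub_zero, Nat.max_eq_right (Nat.zero_le pos)]
    by_cases h2 : kernel.length + (pos - cnt) < kLen ∧ kLen ≤ kernel.length + (pos - cnt) + pos
    · rw [if_pos h2, if_pos (by omega)]
      dsimp only
      have ht : (cycApp pos cnt).take (kLen - kernel.length) =
          List.replicate (pos - cnt) 0 ++ List.replicate (kLen - kernel.length - (pos - cnt)) 1 := by
        rw [cycApp, List.take_append,
          List.take_of_length_le (by simp; omega),
          List.take_append_of_le_length (by simp; omega), List.take_replicate]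
        simp only [List.length_replicate]
        rw [Nat.min_eq_left (by omega)]
      rw [ht, ← List.append_assoc]
      have hn : kLen - (kernel.length + (pos - cnt)) = kLen - kernel.length - (pos - cnt) := by omega
      rw [hn]
    · rw [if_neg h2]
      dsimp only
      simp only [List.length_append, List.length_replicate]
      by_cases h3 : kernel.length + (pos - cnt) + pos < kLen ∧ kLen ≤ kernel.length + (pos - cnt) + pos + pos
      · rw [if_pos h3, if_pos (by omega)]
        dsimp only
        have ht : (cycApp pos cnt).take (kLen - kernel.length) =
            List.replicate (pos - cnt) 0 ++ (List.replicate pos 1 ++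
              List.replicate (kLen - kernel.length - (pos - cnt) - pos) 0) := by
          rw [cycApp, List.take_append,
            List.take_of_length_le (by simp; omega),
            List.take_append,
            List.take_of_length_le (by simp; omega),
            List.take_append_of_le_length (by simp; omega), List.take_replicate]
          simp only [List.length_replicate]
          rw [Nat.min_eq_left (by omega)]
        rw [ht, ← List.append_assoc, ← List.append_assoc]
        have hn : kLen - (kernel.length + (pos - cnt) + pos) =
            kLen - kernel.length - (pos - cnt) - pos := by omega
        rw [hn]
      · rw [if_neg h3]
        dsimp only
        simp only [List.length_append, List.length_replicate]
        by_cases h4 : kernel.length + (pos - cnt) + pos + pos < kLen ∧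
            kLen ≤ kernel.length + (pos - cnt) + pos + pos + pos
        · rw [if_pos h4, if_pos (by omega)]
          dsimp only
          have ht : (cycApp pos cnt).take (kLen - kernel.length) =
              List.replicate (pos - cnt) 0 ++ (List.replicate pos 1 ++
                (List.replicate pos 0 ++
                  List.replicate (kLen - kernel.length - (pos - cnt) - pos - pos) (-1))) := by
            rw [cycApp, List.take_append,
              List.take_of_length_le (by simp; omega),
              List.take_append,
              List.take_of_length_le (by simp; omega),
              List.take_append,
              List.take_of_length_le (by simp; omega), List.take_replicate]
            simp only [List.length_replicate]
            rw [Nat.min_eq_left (by omega)]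
          rw [ht, ← List.append_assoc, ← List.append_assoc, ← List.append_assoc]
          have hn : kLen - (kernel.length + (pos - cnt) + pos + pos) =
              kLen - kernel.length - (pos - cnt) - pos - pos := by omega
          rw [hn]
        · rw [if_neg h4, if_neg (by omega)]
          dsimp only
          rw [cycApp, ← List.append_assoc, ← List.append_assoc, ← List.append_assoc]

theorem cycApp_getElem (pos cnt o : Nat) (hp : 1 ≤ pos) (hc : cnt ≤ 1)
    (ho : o < 4 * pos - cnt) :
    (cycApp pos cnt)[o]'(by simp [cycApp]; omega) = pat4 ((cnt + o) / pos) := by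
  simp only [cycApp]
  rcases Nat.lt_or_ge o (pos - cnt) with h | h
  · rw [List.getElem_append_left (by simp; omega), List.getElem_replicate]
    have : (cnt + o) / pos = 0 := Nat.div_eq_of_lt (by omega)
    rw [this]; rfl
  · rw [List.getElem_append_right (by simp; omega)]
    simp only [List.length_replicate]
    rcases Nat.lt_or_ge (o - (pos - cnt)) pos with h2 | h2
    · rw [List.getElem_append_left (by simp; omega), List.getElem_replicate]
      have : (cnt + o) / pos = 1 := by
        apply Nat.div_eq_of_lt_le <;> omega
      rw [this]; rfl
    · rw [List.getElem_append_right (by simp; omega)]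
      simp only [List.length_replicate]
      rcases Nat.lt_or_ge (o - (pos - cnt) - pos) pos with h3 | h3
      · rw [List.getElem_append_left (by simp; omega), List.getElem_replicate]
        have : (cnt + o) / pos = 2 := by
          apply Nat.div_eq_of_lt_le <;> omega
        rw [this]; rfl
      · rw [List.getElem_append_right (by simp; omega), List.getElem_replicate]
        have : (cnt + o) / pos = 3 := by
          apply Nat.div_eq_of_lt_le <;> omega
        rw [this]; rfl

theorem specList_append (pos m cnt t : Nat) (hp : 1 ≤ pos) (hc : cnt ≤ 1)
    (halign : (m + 1) % (4 * pos) = cnt) (ht : t ≤ 4 * pos - cnt) :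
    specList pos (m + t) = specList pos m ++ (cycApp pos cnt).take t := by
  have hlen : (cycApp pos cnt).length = 4 * pos - cnt := by simp [cycApp]; omega
  apply List.ext_getElem
  · simp [specList, hlen]; omega
  · intro j h1 h2
    have hjmt : j < m + t := by simpa [specList] using h1
    simp only [specList, List.getElem_map, List.getElem_range]
    rcases Nat.lt_or_ge j m with hj | hj
    · rw [List.getElem_append_left (by simp only [List.length_map, List.length_range]; omega)]
      simp
    · rw [List.getElem_append_right (by simp only [List.length_map, List.length_range]; omega)]
      simp only [List.length_map, List.length_range]
      rw [List.getElem_take, cycApp_getElem pos cnt (j - m) hp hc (by omega)]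
      congr 1
      have hq := Nat.div_add_mod (m + 1) (4 * pos)
      rw [halign] at hq
      have hcomm : pos * (4 * ((m + 1) / (4 * pos))) = 4 * pos * ((m + 1) / (4 * pos)) := by ring
      have hj1 : j + 1 = (cnt + (j - m)) + pos * (4 * ((m + 1) / (4 * pos))) := by omega
      rw [hj1, Nat.add_mul_div_left _ _ (by omega : 0 < pos), Nat.add_mul_mod_self_left,
        Nat.mod_eq_of_lt (by rw [Nat.div_lt_iff_lt_mul (by omega : 0 < pos)]; omega)]

theorem gkOuter_eq (kLen pos : Nat) (hp : 1 ≤ pos) :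
    ∀ (fuel m cnt : Nat), m < kLen → cnt ≤ 1 →
      (m + 1) % (4 * pos) = cnt → kLen ≤ m + fuel * (3 * pos) →
      gkOuter kLen pos fuel (specList pos m) cnt = specList pos kLen := by
  intro fuel
  induction fuel with
  | zero => intro m cnt hm _ _ hf; omega
  | succ f ih =>
    intro m cnt hm hc halign hf
    have hL : (specList pos m).length = m := by simp [specList]
    simp only [gkOuter, gkCycle_eq kLen pos _ cnt hp hc, hL]
    by_cases hcond : m < kLen ∧ kLen ≤ m + (4 * pos - cnt)
    · rw [if_pos hcond]
      have := specList_append pos m cnt (kLen - m) hp hc halign (by omega)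
      rw [show m + (kLen - m) = kLen by omega] at this
      exact this.symm
    · rw [if_neg hcond]
      have hfull : cycApp pos cnt = (cycApp pos cnt).take (4 * pos - cnt) := by
        rw [List.take_of_length_le (by simp [cycApp]; omega)]
      have hstep : specList pos m ++ cycApp pos cnt = specList pos (m + (4 * pos - cnt)) := by
        rw [hfull, ← specList_append pos m cnt (4 * pos - cnt) hp hc halign (le_refl _)]
      rw [hstep]
      apply ih
      · omega
      · omega
      · have hq := Nat.div_add_mod (m + 1) (4 * pos)
        rw [halign] at hq
        have hexp : 4 * pos * ((m + 1) / (4 * pos) + 1) = 4 * pos * ((m + 1) / (4 * pos)) + 4 * pos := by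
          ring
        rw [show m + (4 * pos - cnt) + 1 = 4 * pos * ((m + 1) / (4 * pos) + 1) by omega,
          Nat.mul_mod_right]
      · have hexp : (f + 1) * (3 * pos) = f * (3 * pos) + 3 * pos := by ring
        omega

theorem get_kernel_eq (kLen pos : Nat) (hp : 1 ≤ pos) (hk : 1 ≤ kLen) :
    get_kernel kLen pos = specList pos kLen := by
  have h0 : specList pos 0 = [] := by simp [specList]
  rw [get_kernel, ← h0]
  apply gkOuter_eq kLen pos hp kLen 0 1 hk (le_refl 1)
  · exact Nat.mod_eq_of_lt (by omega)
  · have h1 : 0 < 3 * pos := by omega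
    have := Nat.le_mul_of_pos_right kLen h1
    omega

theorem foldl_zip_specList (pos : Nat) :
    ∀ (xs : List Int) (i : Nat) (c : Int),
      ((((List.range' i xs.length).map (fun j => pat4 (((j + 1) / pos) % 4))).zip xs).foldl
        (fun acc kd => acc + kd.1 * kd.2) c) = canonSum pos xs i c := by
  intro xs
  induction xs with
  | nil => intro i c; rfl
  | cons x rest ih =>
    intro i c
    rw [List.length_cons, List.range'_succ, List.map_cons, List.zip_cons_cons, List.foldl_cons,
      canonSum, ih]

theorem fftLoop_eq (input : List Int) :
    ∀ (k p : Nat) (out : List Int), input.length - p = k →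
      fftLoop input input.length p out =
        out ++ (List.range' (p + 1) k).map (digitN input) := by
  intro k
  induction k with
  | zero =>
    intro p out h
    rw [fftLoop, if_neg (by omega)]
    simp
  | succ k ih =>
    intro p out h
    rw [fftLoop, if_pos (by omega)]
    dsimp only
    rw [get_kernel_eq input.length (p + 1) (by omega) (by omega)]
    rw [specList, List.range_eq_range', foldl_zip_specList (p + 1) input 0 0]
    have habs : (if canonSum (p + 1) input 0 0 < 0 then -canonSum (p + 1) input 0 0
        else canonSum (p + 1) input 0 0) = |canonSum (p + 1) input 0 0| := by
      rcases lt_or_ge (canonSum (p + 1) input 0 0) 0 with hx | hx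
      · rw [if_pos hx, abs_of_neg hx]
      · rw [if_neg (not_lt.mpr hx), abs_of_nonneg hx]
    rw [habs, ih (p + 1) _ (by omega), List.range'_succ, List.map_cons]
    simp [digitN]

theorem apply_fft_eq (input : List Int) :
    apply_fft input = (List.range input.length).map (fun k => digitN input (k + 1)) := by
  rw [apply_fft, fftLoop_eq input input.length 0 [] (by omega), List.nil_append,
    List.range'_eq_map_range, List.map_map]
  exact List.map_congr_left (fun k _ => by simp [Nat.add_comm])

-- ======== B-side lemmas ========

-- the kernel coefficient at absolute index i, and interval sums of coef * digit
def coef (pos i : Nat) : Int := pat4 (((i + 1) / pos) % 4)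

def S (pos : Nat) (xs : List Int) (a b : Nat) : Int :=
  ∑ i ∈ Finset.Ico a b, coef pos i * xs.getD i 0

theorem canonSum_sum (pos : Nat) :
    ∀ (xs : List Int) (i : Nat) (c : Int),
      canonSum pos xs i c =
        c + ∑ k ∈ Finset.range xs.length, coef pos (i + k) * xs.getD k 0 := by
  intro xs
  induction xs with
  | nil => intro i c; simp [canonSum]
  | cons x rest ih =>
    intro i c
    rw [canonSum, ih, List.length_cons, Finset.sum_range_succ']
    simp only [List.getD_cons_zero, List.getD_cons_succ]
    have h0 : coef pos (i + 0) = pat4 (((i + 1) / pos) % 4) := by simp [coef]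
    rw [h0]
    have : ∀ k, coef pos (i + 1 + k) = coef pos (i + (k + 1)) := by
      intro k; unfold coef; rw [show i + 1 + k + 1 = i + (k + 1) + 1 from by omega]
    simp only [this]
    ring

theorem canonSum_zero (pos : Nat) (xs : List Int) :
    canonSum pos xs 0 0 = S pos xs 0 xs.length := by
  rw [canonSum_sum, S, Finset.range_eq_Ico]
  simp

-- coefficient values on a block: sign block, gap block, prefix below pos-1
theorem coef_sign (pos j i : Nat) (hp : 0 < pos)
    (h1 : pos - 1 + 2 * pos * j ≤ i) (h2 : i < pos - 1 + 2 * pos * j + pos) :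
    coef pos i = (-1 : Int) ^ j := by
  unfold coef
  have e0 : 2 * pos * j = 2 * (pos * j) := by ring
  rw [e0] at h1 h2
  have lo : (2 * j + 1) * pos ≤ i + 1 := by
    rw [show (2 * j + 1) * pos = 2 * (pos * j) + pos from by ring]; omega
  have hi' : i + 1 < (2 * j + 1 + 1) * pos := by
    rw [show (2 * j + 1 + 1) * pos = 2 * (pos * j) + 2 * pos from by ring]; omega
  rw [Nat.div_eq_of_lt_le lo hi']
  rcases Nat.even_or_odd j with he | ho
  · obtain ⟨t, ht⟩ := he
    have : (2 * j + 1) % 4 = 1 := by omega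
    rw [this, Even.neg_one_pow (by exact ⟨t, ht⟩)]; rfl
  · obtain ⟨t, ht⟩ := ho
    have : (2 * j + 1) % 4 = 3 := by omega
    rw [this, Odd.neg_one_pow (by exact ⟨t, ht⟩)]; rfl

theorem coef_gap (pos j i : Nat) (hp : 0 < pos)
    (h1 : pos - 1 + 2 * pos * j + pos ≤ i) (h2 : i < pos - 1 + 2 * pos * (j + 1)) :
    coef pos i = 0 := by
  unfold coef
  have e0 : 2 * pos * j = 2 * (pos * j) := by ring
  have e1 : 2 * pos * (j + 1) = 2 * (pos * j) + 2 * pos := by ring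
  rw [e0] at h1
  rw [e1] at h2
  have lo : (2 * j + 2) * pos ≤ i + 1 := by
    rw [show (2 * j + 2) * pos = 2 * (pos * j) + 2 * pos from by ring]; omega
  have hi' : i + 1 < (2 * j + 2 + 1) * pos := by
    rw [show (2 * j + 2 + 1) * pos = 2 * (pos * j) + 3 * pos from by ring]; omega
  rw [Nat.div_eq_of_lt_le lo hi']
  have : (2 * j + 2) % 4 = 2 ∨ (2 * j + 2) % 4 = 0 := by omega
  rcases this with h | h <;> rw [h] <;> rfl

theorem coef_low (pos i : Nat) (hp : 0 < pos) (h : i < pos - 1) :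
    coef pos i = 0 := by
  unfold coef
  rw [Nat.div_eq_of_lt (by omega)]
  rfl

-- prefix sums: (xs.take k).sum as a Finset sum of getD
theorem sum_take_eq (xs : List Int) (k : Nat) :
    (xs.take k).sum = ∑ i ∈ Finset.range k, xs.getD i 0 := by
  induction k with
  | zero => simp
  | succ k ih =>
    rw [List.take_add_one, List.sum_append, ih, Finset.sum_range_succ]
    congr 1
    cases h : xs[k]? with
    | none => simp [List.getD, h]
    | some a => simp [List.getD, h]

-- the list B's first loop builds is the map of partial sums
theorem buildPrefix_eq (xs : List Int) :
    xs.foldl (fun st d => (st.1 ++ [st.2 + d], st.2 + d)) (([0], 0) : List Int × Int) =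
      ((List.range (xs.length + 1)).map (fun k => (xs.take k).sum), xs.sum) := by
  induction xs using List.reverseRecOn with
  | nil => simp
  | append_singleton ys d ih =>
    rw [List.foldl_append, ih]
    simp only [List.foldl_cons, List.foldl_nil, Prod.mk.injEq]
    refine ⟨?_, by simp⟩
    rw [show (ys ++ [d]).length + 1 = (ys.length + 1) + 1 from by simp]
    conv_rhs => rw [List.range_succ, List.map_append]
    congr 1
    · apply List.map_congr_left
      intro k hk
      rw [List.mem_range] at hk
      rw [List.take_append_of_le_length (by omega)]
    · simp [List.take_of_length_le (show (ys ++ [d]).length ≤ ys.length + 1 from by simp)]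

theorem pre_getD (xs : List Int) (k : Nat) (hk : k ≤ xs.length) :
    PySem.List.pyGetD
      ((xs.foldl (fun st d => (st.1 ++ [st.2 + d], st.2 + d)) (([0], 0) : List Int × Int)).1)
      (k : Int) 0 = ∑ i ∈ Finset.range k, xs.getD i 0 := by
  rw [buildPrefix_eq, PySem.List.pyGetD_natCast, ← sum_take_eq]
  rw [List.getD_eq_getElem?_getD, List.getElem?_map, List.getElem?_range (by omega)]
  rfl

-- the block loop computes the tail sum ∑_{i ∈ [start, n)} coef pos i * xs[i]
theorem blockLoop_eq (xs : List Int) (pos : Nat) (hp : 0 < pos) :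
    ∀ (m j : Nat) (total : Int), xs.length - (pos - 1 + 2 * pos * j) ≤ m →
      blockLoop
        ((xs.foldl (fun st d => (st.1 ++ [st.2 + d], st.2 + d)) (([0], 0) : List Int × Int)).1)
        xs.length pos (pos - 1 + 2 * pos * j) ((-1) ^ j) total =
      total + S pos xs (pos - 1 + 2 * pos * j) xs.length := by
  intro m
  induction m with
  | zero =>
    intro j total hm
    rw [blockLoop, dif_neg (by omega)]
    rw [S, Finset.Ico_eq_empty (by omega)]
    simp
  | succ m ih =>
    intro j total hm
    set n := xs.length with hn
    set s := pos - 1 + 2 * pos * j with hs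
    by_cases hlt : s < n
    · rw [blockLoop, dif_pos ⟨hlt, hp⟩]
      have hsn : s + 2 * pos = pos - 1 + 2 * pos * (j + 1) := by
        rw [hs]; ring_nf
      have hsign : -((-1 : Int) ^ j) = (-1) ^ (j + 1) := by
        rw [pow_succ]; ring
      have hb2 : n - (s + 2 * pos) ≤ m := by omega
      rw [hsn] at hb2
      rw [hsn, hsign, ih (j + 1) _ hb2]
      set e := min (s + pos) n with he
      rw [pre_getD xs e (by omega), pre_getD xs s (by omega)]
      -- split S s n = S s e + S e n, where S s e is the signed block and S e n = S s' n
      have hse : s ≤ e := by omega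
      have hen : e ≤ n := by omega
      have hsplit : S pos xs s n = S pos xs s e + S pos xs e n := by
        rw [S, S, S, ← Finset.sum_Ico_consecutive _ hse hen]
      have hblock : S pos xs s e = (-1) ^ j * (∑ i ∈ Finset.range e, xs.getD i 0 -
          ∑ i ∈ Finset.range s, xs.getD i 0) := by
        rw [S]
        have hsum : ∑ i ∈ Finset.Ico s e, xs.getD i 0 =
            ∑ i ∈ Finset.range e, xs.getD i 0 - ∑ i ∈ Finset.range s, xs.getD i 0 := by
          simp only [Finset.range_eq_Ico]
          rw [← Finset.sum_Ico_consecutive _ (Nat.zero_le s) hse]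
          ring
        rw [← hsum, Finset.mul_sum]
        apply Finset.sum_congr rfl
        intro i hi
        rw [Finset.mem_Ico] at hi
        rw [coef_sign pos j i hp (by omega) (by omega)]
      have htail : S pos xs e n = S pos xs (pos - 1 + 2 * pos * (j + 1)) n := by
        set s' := pos - 1 + 2 * pos * (j + 1) with hs'
        rcases Nat.lt_or_ge n s' with hns | hns
        · -- both are sums over intervals whose elements have coef 0 or are empty
          rw [S, S, show Finset.Ico s' n = ∅ from Finset.Ico_eq_empty (by omega),
            Finset.sum_empty]
          apply Finset.sum_eq_zero
          intro i hi
          rw [Finset.mem_Ico] at hi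
          have he' : e = s + pos := by omega
          rw [coef_gap pos j i hp (by omega) (by omega), zero_mul]
        · have he' : e = s + pos := by omega
          rw [S, S, ← Finset.sum_Ico_consecutive _ (show e ≤ s' by omega) hns]
          have : ∑ i ∈ Finset.Ico e s', coef pos i * xs.getD i 0 = 0 := by
            apply Finset.sum_eq_zero
            intro i hi
            rw [Finset.mem_Ico] at hi
            rw [coef_gap pos j i hp (by omega) (by omega), zero_mul]
          rw [this, zero_add]
      rw [hsplit, hblock, htail]
      ring
    · rw [blockLoop, dif_neg (by omega)]
      rw [S, Finset.Ico_eq_empty (by omega)]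
      simp

-- B's per-position total equals A's canonical dot product
theorem blockLoop_canon (xs : List Int) (pos : Nat) (hp : 0 < pos) :
    blockLoop
      ((xs.foldl (fun st d => (st.1 ++ [st.2 + d], st.2 + d)) (([0], 0) : List Int × Int)).1)
      xs.length pos (pos - 1) 1 0 = canonSum pos xs 0 0 := by
  have h0 : pos - 1 + 2 * pos * 0 = pos - 1 := by omega
  have hb := blockLoop_eq xs pos hp (xs.length - (pos - 1)) 0 0 (by omega)
  rw [h0] at hb
  norm_num at hb
  rw [hb, canonSum_zero, S, S]
  rcases Nat.lt_or_ge (xs.length) (pos - 1) with h | h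
  · rw [show Finset.Ico (pos - 1) xs.length = ∅ from Finset.Ico_eq_empty (by omega),
      Finset.sum_empty]
    symm
    apply Finset.sum_eq_zero
    intro i hi
    rw [Finset.mem_Ico] at hi
    rw [coef_low pos i hp (by omega), zero_mul]
  · rw [← Finset.sum_Ico_consecutive _ (Nat.zero_le (pos - 1)) h]
    have : ∑ i ∈ Finset.Ico 0 (pos - 1), coef pos i * xs.getD i 0 = 0 := by
      apply Finset.sum_eq_zero
      intro i hi
      rw [Finset.mem_Ico] at hi
      rw [coef_low pos i hp (by omega), zero_mul]
    rw [this, zero_add]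

theorem apply_fft_alt_eq (input : List Int) :
    apply_fft_alt input = (List.range input.length).map (fun k => digitN input (k + 1)) := by
  rw [apply_fft_alt]
  dsimp only
  rw [PySem.List.foldl_append_singleton_eq_map, PySem.List.pyRange_one]
  rw [show ((input.length : Int) + 1 - 1).toNat = input.length by omega]
  rw [List.map_map, List.nil_append]
  apply List.map_congr_left
  intro k _
  simp only [Function.comp]
  rw [show ((1 : Int) + (k : Int)).toNat = k + 1 from by omega]
  have hc := blockLoop_canon input (k + 1) (by omega)
  rw [show k + 1 - 1 = k from rfl] at hc ⊢
  rw [hc]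
  rfl

-- ===== VERDICT (by name: the statement is the Claim_ definition above) =====
theorem apply_fft_spec : Claim_equal_apply_fft := by
  intro input _
  unfold Spec_apply_fft
  rw [apply_fft_eq, apply_fft_alt_eq]
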